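-- pv_equiv track=rewrite | github.com/GunnarThorunnarson/2018-vor | algo/verkefni 2/3_create_graph_with_eulerian_tour.py | create_tour
-- ===== SOURCE A (Python) =====
-- def create_tour(nodes):
--     edges = []
--     for num, node in enumerate(nodes):
--         if num+1 == len(nodes):
--             edges.append((node, nodes[0]))
--         else:
--             edges.append((node, nodes[num+1]))
--
--     return edges
-- ===== SOURCE B (Python) =====
-- def create_tour(nodes):
--     # Backward single pass: walk the nodes in reverse carrying the successor
--     # (initially the first node, which closes the cycle), build the edge list
--     # back-to-front, then reverse it. No indexing, no wraparound branch.
--     if not nodes: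
--         return []
--     edges = []
--     succ = nodes[0]
--     for node in reversed(nodes):
--         edges.append((node, succ))
--         succ = node
--     edges.reverse()
--     return edges
-- ===== Notes on version B (the rewrite author's own statement) =====
-- stated objective: alternative
-- what changed: Replaces A's forward enumerate loop with per-iteration len() comparison and indexed lookups by a single backward pass that carries the successor node (seeded with nodes[0]), builds the edge list back-to-front with no indexing or branch, and reverses it at the end.
import Mathlib
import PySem

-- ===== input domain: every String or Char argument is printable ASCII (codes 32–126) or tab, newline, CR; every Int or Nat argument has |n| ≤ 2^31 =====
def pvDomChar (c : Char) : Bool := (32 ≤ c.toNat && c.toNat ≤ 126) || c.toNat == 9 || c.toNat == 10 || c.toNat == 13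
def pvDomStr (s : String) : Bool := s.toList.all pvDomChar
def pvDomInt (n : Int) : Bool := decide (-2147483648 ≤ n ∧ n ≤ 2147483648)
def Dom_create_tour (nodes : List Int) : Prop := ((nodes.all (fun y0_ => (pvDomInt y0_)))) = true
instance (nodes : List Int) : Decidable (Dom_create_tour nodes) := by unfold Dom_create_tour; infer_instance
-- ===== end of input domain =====

-- B replaces A's forward indexed loop with wraparound if/else by a single backward pass
-- carrying the successor, building the edge list back-to-front and reversing it (alternative decomposition, same cost).

-- ===== PORT A =====
-- edges accumulator over enumerate(nodes); both indexed accesses are in range whenever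
-- the loop body runs, so .getD 0 is exact (the default is never taken).
def create_tour (nodes : List Int) : List (Int × Int) :=
  (PySem.List.enumerate nodes 0).foldl
    (fun edges p =>
      if p.1 + 1 = (nodes.length : Int) then
        edges ++ [(p.2, (PySem.List.pyGet? nodes 0).getD 0)]
      else
        edges ++ [(p.2, (PySem.List.pyGet? nodes (p.1 + 1)).getD 0)]) []

-- ===== PORT B =====
-- `if not nodes: return []`, then a fold over reversed(nodes) carrying (edges, succ),
-- starting with succ = nodes[0]; finally the accumulated edges are reversed.
def create_tour_alt (nodes : List Int) : List (Int × Int) :=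
  match nodes with
  | [] => []
  | first :: _ =>
    ((nodes.reverse.foldl
        (fun (st : List (Int × Int) × Int) node => (st.1 ++ [(node, st.2)], node))
        ([], first)).1).reverse

-- ===== PRECONDITION & SPEC =====
def Spec_create_tour (nodes : List Int) (out : List (Int × Int)) : Prop := out = create_tour_alt nodes
instance (nodes : List Int) (out : List (Int × Int)) : Decidable (Spec_create_tour nodes out) := by unfold Spec_create_tour; infer_instance

-- ===== CLAIM (what is proved, stated in full; the proofs are below) =====
def Claim_equal_create_tour : Prop := ∀ (nodes : List Int), Dom_create_tour nodes → Spec_create_tour nodes (create_tour nodes)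

-- ===== LEMMAS AND PROOFS =====

-- proof helper: the pairs B's backward fold appends, described front-to-back
def pvPairsRev (s : Int) : List Int → List (Int × Int)
  | [] => []
  | x :: xs => (x, s) :: pvPairsRev x xs

theorem pv_foldl_pairsRev :
    ∀ (m : List Int) (acc : List (Int × Int)) (s : Int),
      (m.foldl (fun (st : List (Int × Int) × Int) node => (st.1 ++ [(node, st.2)], node))
        (acc, s)).1 = acc ++ pvPairsRev s m := by
  intro m
  induction m with
  | nil => simp [pvPairsRev]
  | cons x xs ih => intro acc s; simp [List.foldl, pvPairsRev, ih]

theorem pv_pairsRev_zip : ∀ (m : List Int) (s : Int), pvPairsRev s m = m.zip (s :: m) := by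
  intro m
  induction m with
  | nil => intro s; rfl
  | cons x xs ih => intro s; simp [pvPairsRev, List.zip, ih]

theorem pv_alt_zip (nodes : List Int) :
    create_tour_alt nodes = nodes.zip (nodes.tail ++ nodes.take 1) := by
  rcases nodes with _ | ⟨a, t⟩
  · rfl
  · show (List.foldl (fun (st : List (Int × Int) × Int) node => (st.1 ++ [(node, st.2)], node))
        ([], a) (a :: t).reverse).1.reverse = _
    rw [pv_foldl_pairsRev, pv_pairsRev_zip]
    simp only [List.nil_append, List.tail_cons, List.take_succ_cons, List.take_zero]
    apply List.ext_getElem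
    · simp [List.length_zip]
    intro k h1 h2
    have hn : (a :: t).reverse.length = t.length + 1 := by simp
    have hk : k < t.length + 1 := by
      simp [List.length_zip] at h1; omega
    rw [List.getElem_reverse]
    have hlen : ((a :: t).reverse.zip (a :: (a :: t).reverse)).length = t.length + 1 := by
      simp [List.length_zip]
    have hrev : ∀ i (hi : i < (a :: t).reverse.length),
        (a :: t).reverse[i] = (a :: t)[t.length - i]'(by simp only [List.length_cons]; omega) := by
      intro i hi
      rw [List.getElem_reverse]
      congr 1
    have hidx : ((a :: t).reverse.zip (a :: (a :: t).reverse)).length - 1 - k = t.length - k := by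
      simp only [List.length_zip, List.length_reverse, List.length_cons]
      omega
    simp only [hidx]
    have hjlt : t.length - k < (a :: t).reverse.length := by
      simp only [List.length_reverse, List.length_cons]; omega
    rw [List.getElem_zip, List.getElem_zip]
    simp only [Prod.mk.injEq]
    constructor
    · rw [hrev (t.length - k) hjlt]
      congr 1
      omega
    · -- second components
      by_cases hkt : k = t.length
      · -- closing edge: index 0 on the left, last slot of t ++ [a] on the right
        subst hkt
        simp only [Nat.sub_self, List.getElem_cons_zero]
        rw [List.getElem_append_right (by omega)]
        simp
      · have hkl : k < t.length := by omega
        obtain ⟨m, hm⟩ : ∃ m, t.length - k = m + 1 := ⟨t.length - k - 1, by omega⟩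
        simp only [hm, List.getElem_cons_succ]
        rw [hrev m (by simp only [List.length_reverse, List.length_cons]; omega)]
        rw [List.getElem_append_left hkl]
        have h2' : t.length - m = k + 1 := by omega
        simp only [h2', List.getElem_cons_succ]

theorem pv_foldl_append_map {α β : Type} (f : α → β) :
    ∀ (l : List α) (acc : List β),
      List.foldl (fun e p => e ++ [f p]) acc l = acc ++ l.map f := by
  intro l
  induction l with
  | nil => simp
  | cons x xs ih => intro acc; simp [List.foldl, ih]

theorem pv_A_map (nodes : List Int) :
    create_tour nodes =
      (PySem.List.enumerate nodes 0).map
        (fun p => (p.2, if p.1 + 1 = (nodes.length : Int) then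
            (PySem.List.pyGet? nodes 0).getD 0
          else (PySem.List.pyGet? nodes (p.1 + 1)).getD 0)) := by
  unfold create_tour
  rw [show (fun (edges : List (Int × Int)) (p : Int × Int) =>
      if p.1 + 1 = (nodes.length : Int) then
        edges ++ [(p.2, (PySem.List.pyGet? nodes 0).getD 0)]
      else
        edges ++ [(p.2, (PySem.List.pyGet? nodes (p.1 + 1)).getD 0)]) =
    (fun edges p => edges ++ [(fun p : Int × Int => (p.2, if p.1 + 1 = (nodes.length : Int) then
            (PySem.List.pyGet? nodes 0).getD 0
          else (PySem.List.pyGet? nodes (p.1 + 1)).getD 0)) p]) from by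
      funext e p; by_cases h : p.1 + 1 = (nodes.length : Int) <;> simp [h]]
  rw [pv_foldl_append_map]
  simp

theorem pv_A_zip (nodes : List Int) :
    create_tour nodes = nodes.zip (nodes.tail ++ nodes.take 1) := by
  rw [pv_A_map]
  rcases nodes with _ | ⟨a, t⟩
  · rfl
  · simp only [List.tail_cons, List.take_succ_cons, List.take_zero]
    apply List.ext_getElem
    · simp [PySem.List.length_enumerate, List.length_zip]
    intro k h1 h2
    have hk : k < t.length + 1 := by
      simpa [PySem.List.length_enumerate] using h1
    simp only [List.getElem_map, PySem.List.getElem_enumerate, List.getElem_zip]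
    congr 1
    by_cases hlast : k = t.length
    · subst hlast
      rw [if_pos (by simp)]
      rw [show (0:Int) = ((0:Nat):Int) from rfl, PySem.List.pyGet?_natCast]
      simp
    · have hkl : k < t.length := by omega
      rw [if_neg (by simp; omega)]
      rw [show (0:Int) + (k:Int) + 1 = ((k + 1 : Nat) : Int) from by push_cast; ring,
        PySem.List.pyGet?_natCast]
      rw [List.getElem?_cons_succ, List.getElem?_eq_getElem hkl]
      rw [List.getElem_append_left hkl]
      rfl

-- ===== VERDICT (by name: the statement is the Claim_ definition above) =====
theorem create_tour_spec : Claim_equal_create_tour := by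
  intro nodes _
  unfold Spec_create_tour
  rw [pv_A_zip, pv_alt_zip]
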